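-- pv_equiv track=rewrite | github.com/981377660LMT/algorithm-study | 26_misc/约瑟夫环.py | dieAtRound
-- ===== SOURCE A (Python) =====
-- def min2(a: int, b: int) -> int:
--     return a if a < b else b
--
-- def dieAtRound(n: int, k: int, round: int) -> int:
--     """
--     求第round轮出局的人的编号。
--     """
--     alive = n - round + 1
--     if k == 1:
--         return round - 1
--     who = (k - 1) % alive
--     i = alive + 1
--     while i <= n:
--         t = (i - who - 1 + (k - 2)) // (k - 1)
--         t = min2(t, n + 1 - i)
--         i += t - 1
--         who = (who + k * t) % i
--         i += 1
--     return who
-- ===== SOURCE B (Python) =====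
-- def dieAtRound(n: int, k: int, round: int) -> int:
--     """
--     求第round轮出局的人的编号。
--     One-step Josephus recurrence: grow the circle from the elimination
--     round back up to n, advancing the victim index by k at each size.
--     No special k == 1 case and no block-skip jump formula.
--     """
--     who = (k - 1) % (n - round + 1)
--     for i in range(n - round + 2, n + 1):
--         who = (who + k) % i
--     return who
-- ===== Notes on version B (the rewrite author's own statement) =====
-- stated objective: simpler
-- what changed: B replaces A's block-skip acceleration (jump formula t = ceil((i-who-1)/(k-1)), min2 clamp, irregular while-loop increments, and a special k==1 branch) with the plain one-step Josephus recurrence who = (who + k) % i over a uniform for-range, with no branches at all.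
-- outside the precondition, e.g. on dieAtRound(5, 1, 0): A returns -1, B returns 0; on dieAtRound(3, 1, 5): A returns 4, B raises ZeroDivisionError; on dieAtRound(1, 0, 1): A returns 0, B returns 0
import Mathlib
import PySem

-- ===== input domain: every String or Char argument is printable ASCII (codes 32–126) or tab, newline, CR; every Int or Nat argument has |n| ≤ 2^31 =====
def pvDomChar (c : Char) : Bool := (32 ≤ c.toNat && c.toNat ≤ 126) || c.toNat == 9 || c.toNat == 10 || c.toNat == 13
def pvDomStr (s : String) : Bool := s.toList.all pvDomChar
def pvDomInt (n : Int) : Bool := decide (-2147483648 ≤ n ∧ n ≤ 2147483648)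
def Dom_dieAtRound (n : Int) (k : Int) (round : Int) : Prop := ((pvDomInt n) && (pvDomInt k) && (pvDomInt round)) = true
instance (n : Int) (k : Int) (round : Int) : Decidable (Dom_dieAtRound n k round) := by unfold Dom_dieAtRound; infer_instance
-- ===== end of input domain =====

-- B replaces A's block-skip jump formula (and its special k==1 branch) with the plain
-- one-step Josephus recurrence who = (who + k) % i over a uniform range — simpler, not faster.

-- ===== PORT A =====
def min2 (a : Int) (b : Int) : Int := if a < b then a else b

-- A's while loop. Fuel = (n + 1 - i).toNat at entry bounds the iteration count: under
-- Pre_ (k ≥ 2, who ≤ i - 2) each pass increases i by t ≥ 1, so fuel never runs out.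
def dieAtRoundLoop (k : Int) (n : Int) : Nat → Int → Int → Int
  | 0, _, who => who
  | fuel + 1, i, who =>
    if i ≤ n then
      let t0 := PySem.Int.floordiv (i - who - 1 + (k - 2)) (k - 1)
      let t := min2 t0 (n + 1 - i)
      let i' := i + t - 1
      let who' := PySem.Int.mod (who + k * t) i'
      dieAtRoundLoop k n fuel (i' + 1) who'
    else who

def dieAtRound (n : Int) (k : Int) (round : Int) : Int :=
  let alive := n - round + 1
  if k = 1 then round - 1
  else
    let who := PySem.Int.mod (k - 1) alive
    dieAtRoundLoop k n (n + 1 - alive).toNat (alive + 1) who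

-- ===== PORT B =====
def dieAtRound_alt (n : Int) (k : Int) (round : Int) : Int :=
  (PySem.List.pyRange (n - round + 2) (n + 1) 1).foldl
    (fun who i => PySem.Int.mod (who + k) i)
    (PySem.Int.mod (k - 1) (n - round + 1))

-- ===== PRECONDITION & SPEC =====
-- Pre_ excludes: round = n + 1 (A raises ZeroDivisionError), other round > n (A loops on a
-- negative modulus, raises, or returns an accidental value B cannot share since B hits a zero
-- modulus), k = 1 with round outside 1..n (A's shortcut returns round - 1 for a round that
-- does not exist, an artefact of its k == 1 branch), and k ≤ 0 with 1 ≤ round ≤ n (A's jump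
-- formula divides by k - 1 and A loops forever on almost all such inputs).
def Pre_dieAtRound (n : Int) (k : Int) (round : Int) : Prop :=
  (1 ≤ k ∧ 1 ≤ round ∧ round ≤ n) ∨ (k ≠ 1 ∧ round ≤ 0 ∧ round ≠ n + 1)
instance (n : Int) (k : Int) (round : Int) : Decidable (Pre_dieAtRound n k round) := by
  unfold Pre_dieAtRound; infer_instance

def pvWitness_dieAtRound : Int × Int × Int := (7, 3, 4)

def Spec_dieAtRound (n : Int) (k : Int) (round : Int) (out : Int) : Prop :=
  out = dieAtRound_alt n k round
instance (n : Int) (k : Int) (round : Int) (out : Int) : Decidable (Spec_dieAtRound n k round out) := by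
  unfold Spec_dieAtRound; infer_instance

-- ===== CLAIM (what is proved, stated in full; the proofs are below) =====
def Claim_equal_dieAtRound : Prop :=
  ∀ (n : Int) (k : Int) (round : Int), Dom_dieAtRound n k round →
    Pre_dieAtRound n k round → Spec_dieAtRound n k round (dieAtRound n k round)

-- ===== LEMMAS AND PROOFS =====

-- abbreviation for B's loop body
def bstep (k : Int) : Int → Int → Int := fun who i => PySem.Int.mod (who + k) i

-- B's fold advances by exactly k per index while no wrap occurs.
lemma fold_no_wrap (k i who : Int) (j : Nat)
    (h : ∀ m : Nat, m < j → 0 ≤ who + k * (m + 1) ∧ who + k * (m + 1) < i + m) :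
    (PySem.List.pyRange i (i + j) 1).foldl (bstep k) who = who + k * j := by
  induction j generalizing who i with
  | zero => simp [PySem.List.pyRange_one_eq_nil (le_refl i)]
  | succ j ih =>
    rw [show (i + ((j:Nat)+1 : Nat) : Int) = (i + 1) + (j : Nat) by push_cast; ring]
    rw [PySem.List.pyRange_one_cons (by omega)]
    simp only [List.foldl_cons]
    have h0 := h 0 (by omega)
    have h0a : 0 ≤ who + k := by have := h0.1; push_cast at this; linarith
    have h0b : who + k < i := by have := h0.2; push_cast at this; linarith
    have hb : bstep k who i = who + k := by
      simp only [bstep]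
      rw [PySem.Int.mod_eq_emod_of_pos (by linarith), Int.emod_eq_of_lt h0a h0b]
    rw [hb, ih (i + 1) (who + k) ?_]
    · push_cast; ring
    · intro m hm
      have hh := h (m + 1) (by omega)
      have h1 := hh.1; have h2 := hh.2
      push_cast at h1 h2 ⊢
      ring_nf at h1 h2 ⊢
      exact ⟨by linarith, by linarith⟩

-- one pass of A's loop equals t steps of B's fold
lemma fold_block (k i who t : Int) (hk : 2 ≤ k)
    (hw0 : 0 ≤ who) (ht1 : 1 ≤ t)
    (htr : t ≤ PySem.Int.floordiv (i - who - 1 + (k - 2)) (k - 1)) :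
    (PySem.List.pyRange i (i + t) 1).foldl (bstep k) who
      = PySem.Int.mod (who + k * t) (i + t - 1) := by
  have hkm : (0:Int) < k - 1 := by omega
  obtain ⟨j, hj⟩ : ∃ j : Nat, (j : Int) = t - 1 := ⟨(t - 1).toNat, Int.toNat_of_nonneg (by omega)⟩
  have hside : ∀ m : Nat, m < j → 0 ≤ who + k * (m + 1) ∧ who + k * (m + 1) < i + m := by
    intro m hm
    have h2 : (m:Int) + 2 ≤ PySem.Int.floordiv (i - who - 1 + (k - 2)) (k - 1) := by omega
    rw [PySem.Int.le_floordiv_iff_mul_le hkm] at h2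
    have hm0 : (0:Int) ≤ (m:Int) := Int.natCast_nonneg m
    constructor
    · nlinarith [mul_nonneg (by omega : (0:Int) ≤ k) (by linarith : (0:Int) ≤ (m:Int) + 1)]
    · nlinarith
  rw [show i + t = (i + (j:Int)) + 1 by omega,
      PySem.List.pyRange_one_succ_right (by omega), List.foldl_append,
      fold_no_wrap k i who j hside]
  simp only [List.foldl_cons, List.foldl_nil, bstep]
  rw [show who + k * (j:Int) + k = who + k * t by rw [hj]; ring,
      show i + (j:Int) = i + t - 1 by omega]
  norm_num

-- A's loop, run with enough fuel from a valid state, computes B's fold to n+1.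
lemma loop_eq (k n : Int) (hk : 2 ≤ k) :
    ∀ (fuel : Nat) (i who : Int), 2 ≤ i → 0 ≤ who → who ≤ i - 2 →
      (n + 1 - i).toNat ≤ fuel →
      dieAtRoundLoop k n fuel i who
        = (PySem.List.pyRange i (n + 1) 1).foldl (bstep k) who := by
  intro fuel
  induction fuel with
  | zero =>
    intro i who hi hw0 hw hf
    have : n + 1 ≤ i := by omega
    simp [dieAtRoundLoop, PySem.List.pyRange_one_eq_nil this]
  | succ fuel ih =>
    intro i who hi hw0 hw hf
    by_cases hin : i ≤ n
    · have hkm : (0:Int) < k - 1 := by omega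
      simp only [dieAtRoundLoop, if_pos hin]
      set t0 := PySem.Int.floordiv (i - who - 1 + (k - 2)) (k - 1) with ht0
      have ht01 : 1 ≤ t0 := by
        rw [ht0, PySem.Int.le_floordiv_iff_mul_le hkm]; nlinarith
      set t := min2 t0 (n + 1 - i) with ht
      have ht1 : 1 ≤ t := by simp only [ht, min2]; split <;> omega
      have htn : t ≤ n + 1 - i := by simp only [ht, min2]; split <;> omega
      have htr : t ≤ t0 := by simp only [ht, min2]; split <;> omega
      rw [PySem.List.pyRange_one_append i (i + t) (n + 1) (by omega) (by omega),
          List.foldl_append,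
          fold_block k i who t hk hw0 ht1 htr]
      have hmodpos : (0:Int) < i + t - 1 := by omega
      have hw' : PySem.Int.mod (who + k * t) (i + t - 1) ≤ (i + t) - 2 := by
        have := PySem.Int.mod_lt (who + k * t) hmodpos
        omega
      have hw0' : 0 ≤ PySem.Int.mod (who + k * t) (i + t - 1) :=
        PySem.Int.mod_nonneg _ hmodpos
      have := ih (i + t) (PySem.Int.mod (who + k * t) (i + t - 1))
        (by omega) hw0' hw' (by omega)
      rw [show i + t - 1 + 1 = i + t by ring]
      exact this
    · have : n + 1 ≤ i := by omega
      simp [dieAtRoundLoop, if_neg hin, PySem.List.pyRange_one_eq_nil this]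

-- for k = 1 B's fold counts up without ever wrapping
lemma fold_k1 (a : Int) (ha : 1 ≤ a) :
    ∀ (j : Nat), (PySem.List.pyRange (a + 1) (a + 1 + j) 1).foldl (bstep 1) 0 = j := by
  intro j
  induction j with
  | zero => simp
  | succ j ih =>
    rw [show (a + 1 + ((j:Nat)+1 : Nat) : Int) = (a + 1 + (j : Nat)) + 1 by push_cast; ring]
    rw [PySem.List.pyRange_one_succ_right (by omega), List.foldl_append, ih]
    simp only [List.foldl_cons, List.foldl_nil, bstep]
    rw [PySem.Int.mod_eq_emod_of_pos (by omega), Int.emod_eq_of_lt (by omega) (by omega)]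
    push_cast; ring

-- ===== VERDICT (by name: the statement is the Claim_ definition above) =====
theorem dieAtRound_spec : Claim_equal_dieAtRound := by
  intro n k round _ hpre
  unfold Spec_dieAtRound dieAtRound dieAtRound_alt
  rcases hpre with ⟨hk, hr1, hrn⟩ | ⟨hk1, hr0, hrn1⟩
  case inr =>
    rw [if_neg hk1, show (n + 1 - (n - round + 1)).toNat = 0 by omega]
    simp [dieAtRoundLoop, PySem.List.pyRange_one_eq_nil (by omega : (n:Int) + 1 ≤ n - round + 2)]
  by_cases hk1 : k = 1
  · subst hk1
    rw [if_pos rfl]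
    have halive : (1:Int) ≤ n - round + 1 := by omega
    have hm0 : PySem.Int.mod (1 - 1) (n - round + 1) = 0 := by
      rw [PySem.Int.mod_eq_emod_of_pos (by omega)]; simp
    rw [hm0]
    have hj : ∃ j : Nat, (j : Int) = round - 1 := ⟨(round - 1).toNat, Int.toNat_of_nonneg (by omega)⟩
    obtain ⟨j, hj⟩ := hj
    have := fold_k1 (n - round + 1) halive j
    rw [show n - round + 1 + 1 + (j : Int) = n + 1 by omega] at this
    rw [show n - round + 2 = n - round + 1 + 1 by ring]
    rw [show (fun who i => PySem.Int.mod (who + 1) i) = bstep 1 from rfl, this, hj]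
  · have hk2 : 2 ≤ k := by omega
    rw [if_neg hk1]
    have halive : (1:Int) ≤ n - round + 1 := by omega
    have hmpos : (0:Int) < n - round + 1 := by omega
    have hw0 : 0 ≤ PySem.Int.mod (k - 1) (n - round + 1) := PySem.Int.mod_nonneg _ hmpos
    have hwlt := PySem.Int.mod_lt (k - 1) hmpos
    rw [loop_eq k n hk2 _ _ _ (by omega) hw0 (by omega) (by omega)]
    rw [show n - round + 1 + 1 = n - round + 2 by ring]
    rfl
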